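-- pv_equiv track=rewrite | github.com/sinf/typing_coach | typing.py | series_to_text
-- ===== SOURCE A (Python) =====
-- def series_to_text(word_series, max_ch):
-- 	out=""
-- 	x=0
-- 	for index, word in word_series.items():
-- 		s=" " + str(word).strip()
-- 		x += len(s)
-- 		if x > max_ch:
-- 			break
-- 		out += s
-- 	if len(out)==0:
-- 		raise Exception('empty word series')
-- 	return out[1:] + "."
-- ===== SOURCE B (Python) =====
-- def series_to_text(word_series, max_ch):
--     # table-building pass + selection/join pass (same result as A's early-break loop)
--     parts = [" " + str(w).strip() for w in word_series.values()]
--     totals = []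
--     t = 0
--     for p in parts:
--         t += len(p)
--         totals.append(t)
--     # totals are strictly increasing (each part has length >= 1), so the
--     # fitting totals are exactly a prefix: counting them gives the cut point
--     k = sum(1 for t in totals if t <= max_ch)
--     kept = parts[:k]
--     if not kept:
--         raise Exception('empty word series')
--     return "".join(kept)[1:] + "."
-- ===== Notes on version B (the rewrite author's own statement) =====
-- stated objective: alternative
-- what changed: Replaced the single stateful accumulate-and-break loop by a table-building pass (parts list and running totals) followed by a separate count-select-join pass; correctness rests on the totals being strictly increasing so the fitting totals form a prefix.
import Mathlib
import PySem

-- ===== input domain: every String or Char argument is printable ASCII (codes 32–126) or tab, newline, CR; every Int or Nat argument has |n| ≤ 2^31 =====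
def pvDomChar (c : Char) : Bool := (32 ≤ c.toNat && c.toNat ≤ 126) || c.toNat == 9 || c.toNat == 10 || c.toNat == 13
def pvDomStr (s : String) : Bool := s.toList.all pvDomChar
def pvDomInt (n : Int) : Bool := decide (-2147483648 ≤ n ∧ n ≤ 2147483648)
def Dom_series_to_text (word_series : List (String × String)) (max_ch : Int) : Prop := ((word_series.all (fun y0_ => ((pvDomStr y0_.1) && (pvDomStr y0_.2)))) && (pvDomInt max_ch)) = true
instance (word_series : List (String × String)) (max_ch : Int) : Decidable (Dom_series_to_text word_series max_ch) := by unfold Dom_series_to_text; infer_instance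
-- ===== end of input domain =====

-- B replaces A's single accumulate-and-break loop by a parts/totals table plus a
-- separate count-select-join pass (alternative decomposition, same cost).


-- ===== PORT A =====
-- A's for-loop with state (out, x) and early break; the final raise branch is
-- unrepresentable in String, so it lies outside Pre_ (the port just returns there).
def seriesLoopA (max_ch : Int) : List (String × String) → List Char → Int → List Char
  | [], out, _ => out
  | (_, w) :: rest, out, x =>
    let s := ' ' :: PySem.Chars.strip w.toList
    let x' := x + (s.length : Int)
    if x' > max_ch then out
    else seriesLoopA max_ch rest (out ++ s) x'

def series_to_text (word_series : List (String × String)) (max_ch : Int) : String :=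
  let out := seriesLoopA max_ch word_series [] 0
  String.ofList (PySem.List.slice out (some 1) none ++ ['.'])

-- ===== PORT B =====
-- running totals table (t starts at 0, each entry is the previous plus the part's length)
def altTotals : List (List Char) → Int → List Int
  | [], _ => []
  | p :: rest, t => (t + (p.length : Int)) :: altTotals rest (t + (p.length : Int))

def series_to_text_alt (word_series : List (String × String)) (max_ch : Int) : String :=
  let parts := word_series.map (fun q => ' ' :: PySem.Chars.strip q.2.toList)
  let totals := altTotals parts 0
  let k := totals.countP (fun t => decide (t ≤ max_ch))   -- sum(1 for t in totals if t <= max_ch)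
  let kept := parts.take k                                 -- parts[:k], k ≥ 0
  String.ofList (PySem.List.slice kept.flatten (some 1) none ++ ['.'])  -- "".join(kept)[1:] + "."

-- ===== PRECONDITION & SPEC =====
-- Pre_ excludes exactly the inputs where Python A raises Exception('empty word series'):
-- empty series, or the first word's " "+strip already exceeds max_ch (then nothing is kept).
def Pre_series_to_text (word_series : List (String × String)) (max_ch : Int) : Prop :=
  (match word_series.head? with
   | none => false
   | some q => decide ((1 + ((PySem.Chars.strip q.2.toList).length : Int)) ≤ max_ch)) = true
instance (word_series : List (String × String)) (max_ch : Int) : Decidable (Pre_series_to_text word_series max_ch) := by unfold Pre_series_to_text; infer_instance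
def pvWitness_series_to_text : (List (String × String)) × Int := ([("a", "hi"), ("b", "yo")], 10)

def Spec_series_to_text (word_series : List (String × String)) (max_ch : Int) (out : String) : Prop := out = series_to_text_alt word_series max_ch
instance (word_series : List (String × String)) (max_ch : Int) (out : String) : Decidable (Spec_series_to_text word_series max_ch out) := by unfold Spec_series_to_text; infer_instance

-- ===== CLAIM (what is proved, stated in full; the proofs are below) =====
def Claim_equal_series_to_text : Prop := ∀ (word_series : List (String × String)) (max_ch : Int), Dom_series_to_text word_series max_ch → Pre_series_to_text word_series max_ch → Spec_series_to_text word_series max_ch (series_to_text word_series max_ch)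

-- ===== LEMMAS AND PROOFS =====

-- every running total is at least the starting value
lemma altTotals_ge (ps : List (List Char)) (t0 : Int) :
    ∀ t ∈ altTotals ps t0, t0 ≤ t := by
  induction ps generalizing t0 with
  | nil => simp [altTotals]
  | cons p rest ih =>
    intro t ht
    simp only [altTotals, List.mem_cons] at ht
    rcases ht with rfl | ht
    · have : (0 : Int) ≤ (p.length : Int) := by positivity
      omega
    · have h1 := ih (t0 + (p.length : Int)) t ht
      have : (0 : Int) ≤ (p.length : Int) := by positivity
      omega

-- A's loop equals B's count-select-join, for any loop state
lemma loop_eq_select (max_ch : Int) (ws : List (String × String)) :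
    ∀ (out : List Char) (x : Int),
      seriesLoopA max_ch ws out x
        = out ++ (let parts := ws.map (fun q => ' ' :: PySem.Chars.strip q.2.toList)
                  parts.take ((altTotals parts x).countP (fun t => decide (t ≤ max_ch)))).flatten := by
  induction ws with
  | nil => intro out x; simp [seriesLoopA]
  | cons q rest ih =>
    intro out x
    simp only [seriesLoopA, List.map_cons, altTotals, List.countP_cons]
    by_cases h : x + ((' ' :: PySem.Chars.strip q.2.toList).length : Int) > max_ch
    · rw [if_pos h]
      have hcount :
          (altTotals (rest.map (fun q => ' ' :: PySem.Chars.strip q.2.toList))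
              (x + ((' ' :: PySem.Chars.strip q.2.toList).length : Int))).countP
            (fun t => decide (t ≤ max_ch)) = 0 := by
        rw [List.countP_eq_zero]
        intro t ht
        have := altTotals_ge _ _ t ht
        simpa using (by omega : ¬ t ≤ max_ch)
      rw [hcount]
      have hif : (if decide (x + ((' ' :: PySem.Chars.strip q.2.toList).length : Int) ≤ max_ch) = true then 1 else 0) = 0 := by
        rw [decide_eq_false (not_le.mpr h)]; rfl
      rw [hif]
      simp
    · rw [if_neg h]
      rw [ih (out ++ (' ' :: PySem.Chars.strip q.2.toList)) (x + ((' ' :: PySem.Chars.strip q.2.toList).length : Int))]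
      have hif : (if decide (x + ((' ' :: PySem.Chars.strip q.2.toList).length : Int) ≤ max_ch) = true then 1 else 0) = 1 := by
        rw [decide_eq_true (not_lt.mp h)]; rfl
      rw [hif]
      simp [List.append_assoc]

theorem series_to_text_eq_alt (ws : List (String × String)) (max_ch : Int) :
    series_to_text ws max_ch = series_to_text_alt ws max_ch := by
  unfold series_to_text series_to_text_alt
  rw [loop_eq_select max_ch ws [] 0]
  simp

-- ===== VERDICT (by name: the statement is the Claim_ definition above) =====
theorem series_to_text_spec : Claim_equal_series_to_text := by
  intro ws max_ch _ _
  unfold Spec_series_to_text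
  exact series_to_text_eq_alt ws max_ch
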